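-- pv_equiv track=rewrite | github.com/ja-errorpro/CYCS_ComputationalThinking | A12/Q2.py | findShortestPathPlusCalls
-- ===== SOURCE A (Python) =====
-- def findShortestPathPlusCalls(graph, start, end, path=[]):
--     path = path + [start]
--     c = 1
--     if start == end:
--         return path, c
--     if not (start in graph):
--         return None, c
--     shortestPath = None
--     for node in graph[start]:
--         if node not in path:
--             newpath, d = findShortestPathPlusCalls(graph, node, end, path)
--             c += d
--             if newpath:
--                 if not shortestPath or len(newpath) < len(shortestPath):
--                     shortestPath = newpath
--
--     return shortestPath, c
-- ===== SOURCE B (Python) =====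
-- def _paths(graph, start, end, path):
--     # path already includes start; returns every simple path from start to end, in DFS preorder
--     if start == end:
--         return [path]
--     if start not in graph:
--         return []
--     out = []
--     for node in graph[start]:
--         if node not in path:
--             out.extend(_paths(graph, node, end, path + [node]))
--     return out
--
-- def _calls(graph, start, end, path):
--     # path already includes start; number of recursive invocations A would make from here
--     if start == end or start not in graph:
--         return 1
--     c = 1
--     for node in graph[start]:
--         if node not in path:
--             c += _calls(graph, node, end, path + [node])
--     return c
--
-- def findShortestPathPlusCalls(graph, start, end, path=[]):
--     p = path + [start]
--     best = None
--     for q in _paths(graph, start, end, p):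
--         if best is None or len(q) < len(best):
--             best = q
--     return best, _calls(graph, start, end, p)
-- ===== Notes on version B (the rewrite author's own statement) =====
-- stated objective: alternative
-- what changed: A threads the running shortest path and the call counter through one recursion; B instead enumerates all complete simple paths in DFS preorder, picks the first shortest with a separate fold, and counts the recursive calls with an independent recursion.
import Mathlib
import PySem

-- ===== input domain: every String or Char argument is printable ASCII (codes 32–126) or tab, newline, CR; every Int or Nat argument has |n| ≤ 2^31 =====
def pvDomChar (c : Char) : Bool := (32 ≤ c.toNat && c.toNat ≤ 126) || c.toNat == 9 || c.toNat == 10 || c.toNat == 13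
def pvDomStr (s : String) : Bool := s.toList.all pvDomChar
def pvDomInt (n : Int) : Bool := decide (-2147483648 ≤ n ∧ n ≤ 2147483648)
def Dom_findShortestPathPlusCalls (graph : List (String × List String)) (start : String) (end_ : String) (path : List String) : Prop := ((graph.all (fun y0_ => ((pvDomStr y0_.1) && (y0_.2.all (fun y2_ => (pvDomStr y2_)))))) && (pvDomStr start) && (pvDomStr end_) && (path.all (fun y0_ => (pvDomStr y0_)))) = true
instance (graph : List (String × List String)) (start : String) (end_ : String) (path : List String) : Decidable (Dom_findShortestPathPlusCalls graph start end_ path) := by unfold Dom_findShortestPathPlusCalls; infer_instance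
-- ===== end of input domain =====

-- B replaces A's single recursion threading (shortest, count) by path enumeration + a
-- separate min fold + a separate call-counting recursion (objective: alternative).
-- Both ports use a fuel parameter graph.length + 2 only as a totality guard; the
-- recursion depth is bounded by the number of graph keys + 2, so fuel never runs out.

-- ===== PORT A =====
-- Python:  if newpath: / if not shortestPath or len(newpath) < len(shortestPath)
def updA (sp : Option (List String)) (r : Option (List String)) : Option (List String) :=
  match r with
  | none => sp
  | some p =>
    if p = [] then sp
    else match sp with
      | none => some p
      | some s => if s = [] ∨ p.length < s.length then some p else sp

def findAux (graph : List (String × List String)) (end_ : String) : Nat → String → List String → Option (List String) × Int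
  | 0, _, _ => (none, 0)   -- never reached: fuel = graph.length + 2 bounds the depth
  | fuel+1, start, path =>
    if start == end_ then (some (path ++ [start]), 1)
    else if (PySem.Dict.mk graph).contains start = false then (none, 1)
    else
      ((PySem.Dict.mk graph).getD start []).foldl
        (fun (acc : Option (List String) × Int) node =>
          if (path ++ [start]).contains node then acc
          else (updA acc.1 (findAux graph end_ fuel node (path ++ [start])).1,
                acc.2 + (findAux graph end_ fuel node (path ++ [start])).2))
        (none, (1 : Int))

def findShortestPathPlusCalls (graph : List (String × List String)) (start : String) (end_ : String) (path : List String) : Option (List String) × Int :=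
  findAux graph end_ (graph.length + 2) start path

-- ===== PORT B =====
-- all complete simple paths from start to end_, in DFS preorder (path already contains start)
def pathsAux (graph : List (String × List String)) (end_ : String) : Nat → String → List String → List (List String)
  | 0, _, _ => []
  | fuel+1, start, path =>
    if start == end_ then [path]
    else if (PySem.Dict.mk graph).contains start = false then []
    else
      ((PySem.Dict.mk graph).getD start []).foldl
        (fun out node =>
          if path.contains node then out
          else out ++ pathsAux graph end_ fuel node (path ++ [node])) []

-- number of calls A's recursion would make from here
def callsAux (graph : List (String × List String)) (end_ : String) : Nat → String → List String → Int
  | 0, _, _ => 0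
  | fuel+1, start, path =>
    if (start == end_) = true ∨ (PySem.Dict.mk graph).contains start = false then 1
    else
      ((PySem.Dict.mk graph).getD start []).foldl
        (fun c node =>
          if path.contains node then c
          else c + callsAux graph end_ fuel node (path ++ [node])) 1

-- Python: if best is None or len(q) < len(best): best = q
def selStep (best : Option (List String)) (q : List String) : Option (List String) :=
  match best with
  | none => some q
  | some b => if q.length < b.length then some q else best

def pickB (ps : List (List String)) : Option (List String) := ps.foldl selStep none

def findShortestPathPlusCalls_alt (graph : List (String × List String)) (start : String) (end_ : String) (path : List String) : Option (List String) × Int :=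
  (pickB (pathsAux graph end_ (graph.length + 2) start (path ++ [start])),
   callsAux graph end_ (graph.length + 2) start (path ++ [start]))

-- ===== PRECONDITION & SPEC =====
def Spec_findShortestPathPlusCalls (graph : List (String × List String)) (start : String) (end_ : String) (path : List String) (out : Option (List String) × Int) : Prop := out = findShortestPathPlusCalls_alt graph start end_ path
instance (graph : List (String × List String)) (start : String) (end_ : String) (path : List String) (out : Option (List String) × Int) : Decidable (Spec_findShortestPathPlusCalls graph start end_ path out) := by unfold Spec_findShortestPathPlusCalls; infer_instance

-- ===== CLAIM (what is proved, stated in full; the proofs are below) =====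
def Claim_equal_findShortestPathPlusCalls : Prop := ∀ (graph : List (String × List String)) (start : String) (end_ : String) (path : List String), Dom_findShortestPathPlusCalls graph start end_ path → Spec_findShortestPathPlusCalls graph start end_ path (findShortestPathPlusCalls graph start end_ path)

-- ===== LEMMAS AND PROOFS =====

-- combi sp r: what A's per-child update does with the child's already-picked minimum r
def combi (sp r : Option (List String)) : Option (List String) :=
  match r with
  | none => sp
  | some p =>
    match sp with
    | none => some p
    | some s => if p.length < s.length then some p else sp

lemma foldl_selStep_mem : ∀ (xs : List (List String)) (acc : Option (List String)),
    xs.foldl selStep acc = acc ∨ ∃ p ∈ xs, xs.foldl selStep acc = some p := by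
  intro xs
  induction xs with
  | nil => intro acc; left; rfl
  | cons x t ih =>
    intro acc
    simp only [List.foldl_cons]
    rcases ih (selStep acc x) with h | ⟨p, hp, h⟩
    · rw [h]
      cases acc with
      | none => right; exact ⟨x, by simp, rfl⟩
      | some b =>
        simp only [selStep]
        split
        · right; exact ⟨x, by simp, rfl⟩
        · left; rfl
    · right; exact ⟨p, by simp [hp], h⟩

lemma foldl_selStep_combi : ∀ (xs : List (List String)) (sp : Option (List String)),
    xs.foldl selStep sp = combi sp (xs.foldl selStep none) := by
  intro xs
  induction xs with
  | nil => intro sp; cases sp <;> rfl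
  | cons x t ih =>
    intro sp
    simp only [List.foldl_cons]
    rw [ih (selStep sp x), ih (selStep none x)]
    cases hm : t.foldl selStep none with
    | none => cases sp <;> simp only [selStep, combi]
    | some q =>
      cases sp with
      | none =>
        by_cases h1 : q.length < x.length <;> simp [selStep, combi, h1]
      | some s =>
        by_cases h1 : x.length < s.length <;> by_cases h2 : q.length < x.length <;>
          by_cases h3 : q.length < s.length <;>
          simp [selStep, combi, h1, h2, h3] <;> first | rfl | omega

lemma pick_ok (xs : List (List String)) (hxs : ∀ p ∈ xs, p ≠ []) :
    ∀ s, pickB xs = some s → s ≠ [] := by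
  intro s hs
  simp only [pickB] at hs
  rcases foldl_selStep_mem xs none with h | ⟨p, hp, h⟩
  · rw [h] at hs; cases hs
  · rw [h] at hs
    injection hs with h'
    exact h' ▸ hxs p hp

lemma updA_pick (xs : List (List String)) (sp : Option (List String))
    (hxs : ∀ p ∈ xs, p ≠ []) (hsp : ∀ s, sp = some s → s ≠ []) :
    updA sp (pickB xs) = xs.foldl selStep sp := by
  simp only [pickB]
  rw [foldl_selStep_combi xs sp]
  cases h : xs.foldl selStep none with
  | none => cases sp <;> rfl
  | some p =>
    have hpmem : p ∈ xs := by
      rcases foldl_selStep_mem xs none with h' | ⟨q, hq, h'⟩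
      · rw [h'] at h; cases h
      · rw [h'] at h
        injection h with h''
        exact h'' ▸ hq
    have hpne : p ≠ [] := hxs p hpmem
    cases sp with
    | none => simp [updA, combi, hpne]
    | some s =>
      have hsne : s ≠ [] := hsp s rfl
      simp only [updA, combi]
      rw [if_neg hpne]
      by_cases hps : p.length < s.length
      · rw [if_pos (Or.inr hps), if_pos hps]
      · rw [if_neg (by simp [hsne, hps]), if_neg hps]

lemma mem_foldl_append {α β : Type} (cond : β → Bool) (f : β → List α) :
    ∀ (l : List β) (b : List α) (x : α),
      x ∈ l.foldl (fun out n => if cond n then out else out ++ f n) b →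
      x ∈ b ∨ ∃ n ∈ l, x ∈ f n := by
  intro l
  induction l with
  | nil => intro b x h; exact Or.inl h
  | cons n t ih =>
    intro b x h
    simp only [List.foldl_cons] at h
    by_cases hc : cond n
    · rw [if_pos hc] at h
      rcases ih b x h with h' | ⟨m, hm, h'⟩
      · exact Or.inl h'
      · exact Or.inr ⟨m, by simp [hm], h'⟩
    · rw [if_neg (by simp [hc])] at h
      rcases ih (b ++ f n) x h with h' | ⟨m, hm, h'⟩
      · rcases List.mem_append.1 h' with h'' | h''
        · exact Or.inl h''
        · exact Or.inr ⟨n, by simp, h''⟩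
      · exact Or.inr ⟨m, by simp [hm], h'⟩

lemma paths_ne (graph : List (String × List String)) (end_ : String) :
    ∀ (fuel : Nat) (start : String) (path : List String), path ≠ [] →
      ∀ p ∈ pathsAux graph end_ fuel start path, p ≠ [] := by
  intro fuel
  induction fuel with
  | zero => intro s pa _ p hp; simp [pathsAux] at hp
  | succ f ih =>
    intro s pa hpa p hp
    simp only [pathsAux] at hp
    split at hp
    · simp only [List.mem_singleton] at hp
      rw [hp]; exact hpa
    · split at hp
      · simp at hp
      · rcases mem_foldl_append (fun n => pa.contains n)
            (fun n => pathsAux graph end_ f n (pa ++ [n])) _ [] p hp with h | ⟨n, _, h⟩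
        · simp at h
        · exact ih n (pa ++ [n]) (by simp) p h

lemma foldl_main (cond : String → Bool) (res : String → Option (List String) × Int)
    (P : String → List (List String)) (C : String → Int)
    (hres : ∀ n, res n = (pickB (P n), C n))
    (hne : ∀ n, ∀ p ∈ P n, p ≠ []) :
    ∀ (l : List String) (sp : Option (List String)) (ps : List (List String)) (c : Int),
      sp = pickB ps → (∀ p ∈ ps, p ≠ []) →
      l.foldl (fun (acc : Option (List String) × Int) node =>
          if cond node then acc
          else (updA acc.1 (res node).1, acc.2 + (res node).2)) (sp, c)
        = (pickB (l.foldl (fun out node => if cond node then out else out ++ P node) ps),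
           l.foldl (fun c node => if cond node then c else c + C node) c) := by
  intro l
  induction l with
  | nil => intro sp ps c hsp _; simp [hsp]
  | cons n t ih =>
    intro sp ps c hsp hok
    simp only [List.foldl_cons]
    by_cases hc : cond n
    · simp only [if_pos hc]
      exact ih sp ps c hsp hok
    · simp only [if_neg (by simp [hc] : ¬(cond n = true)), hres n]
      have hok' : ∀ p ∈ ps ++ P n, p ≠ [] := by
        intro p hp
        rcases List.mem_append.1 hp with h | h
        · exact hok p h
        · exact hne n p h
      have hsp' : updA sp (pickB (P n)) = pickB (ps ++ P n) := by
        rw [updA_pick (P n) sp (hne n) (by rw [hsp]; exact pick_ok ps hok)]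
        rw [hsp]; simp only [pickB]; rw [List.foldl_append]
      exact ih (updA sp (pickB (P n))) (ps ++ P n) (c + C n) hsp' hok'

lemma findAux_eq (graph : List (String × List String)) (end_ : String) :
    ∀ (fuel : Nat) (start : String) (path : List String),
      findAux graph end_ fuel start path
        = (pickB (pathsAux graph end_ fuel start (path ++ [start])),
           callsAux graph end_ fuel start (path ++ [start])) := by
  intro fuel
  induction fuel with
  | zero => intro s pa; rfl
  | succ f ih =>
    intro s pa
    by_cases h1 : (s == end_) = true
    · simp [findAux, pathsAux, callsAux, h1, pickB, selStep]
    · by_cases h2 : (PySem.Dict.mk graph).contains s = false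
      · simp [findAux, pathsAux, callsAux, h1, h2, pickB]
      · have n3 : ¬((s == end_) = true ∨ (PySem.Dict.mk graph).contains s = false) := by
          rintro (h | h)
          · exact h1 h
          · exact h2 h
        simp only [findAux, pathsAux, callsAux, if_neg h1, if_neg h2, if_neg n3]
        exact foldl_main (fun n => (pa ++ [s]).contains n)
          (fun n => findAux graph end_ f n (pa ++ [s]))
          (fun n => pathsAux graph end_ f n ((pa ++ [s]) ++ [n]))
          (fun n => callsAux graph end_ f n ((pa ++ [s]) ++ [n]))
          (fun n => ih n (pa ++ [s]))
          (fun n => paths_ne graph end_ f n ((pa ++ [s]) ++ [n]) (by simp))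
          _ none [] 1 rfl (by simp)

-- ===== VERDICT (by name: the statement is the Claim_ definition above) =====
theorem findShortestPathPlusCalls_spec : Claim_equal_findShortestPathPlusCalls := by
  intro graph start end_ path _
  show findShortestPathPlusCalls graph start end_ path = findShortestPathPlusCalls_alt graph start end_ path
  rw [findShortestPathPlusCalls, findShortestPathPlusCalls_alt, findAux_eq]
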